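-- pv_equiv track=rewrite | github.com/tum-pbs/PhiFlow | phi/math/_helper.py | _get_pad_width_axes
-- ===== SOURCE A (Python) =====
-- def _get_pad_width_axes(rank, axes, val_true=(1, 1), val_false=(0, 0)):
--     mid_shape = []
--     for i in range(rank):
--         if _contains_axis(axes, i, rank):
--             mid_shape.append(val_true)
--         else:
--             mid_shape.append(val_false)
--     return [[0, 0]] + mid_shape + [[0, 0]]
--
-- def _contains_axis(axes, axis, sp_rank):
--     assert -sp_rank <= axis < sp_rank
--     return (axes is None) or (axis in axes) or (axis + sp_rank in axes)
-- ===== SOURCE B (Python) =====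
-- def _get_pad_width_axes(rank, axes, val_true=(1, 1), val_false=(0, 0)):
--     if axes is None:
--         mid = [val_true] * rank
--     else:
--         mid = [val_false] * rank
--         for a in axes:
--             if 0 <= a < rank:
--                 mid[a] = val_true
--             elif rank <= a < 2 * rank:
--                 mid[a - rank] = val_true
--     return [[0, 0]] + mid + [[0, 0]]
-- ===== Notes on version B (the rewrite author's own statement) =====
-- stated objective: faster
-- what changed: B scatters over the axes list into a preallocated middle row instead of testing membership of every index in axes, turning O(rank*|axes|) membership scans into one O(rank+|axes|) pass.
import Mathlib
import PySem

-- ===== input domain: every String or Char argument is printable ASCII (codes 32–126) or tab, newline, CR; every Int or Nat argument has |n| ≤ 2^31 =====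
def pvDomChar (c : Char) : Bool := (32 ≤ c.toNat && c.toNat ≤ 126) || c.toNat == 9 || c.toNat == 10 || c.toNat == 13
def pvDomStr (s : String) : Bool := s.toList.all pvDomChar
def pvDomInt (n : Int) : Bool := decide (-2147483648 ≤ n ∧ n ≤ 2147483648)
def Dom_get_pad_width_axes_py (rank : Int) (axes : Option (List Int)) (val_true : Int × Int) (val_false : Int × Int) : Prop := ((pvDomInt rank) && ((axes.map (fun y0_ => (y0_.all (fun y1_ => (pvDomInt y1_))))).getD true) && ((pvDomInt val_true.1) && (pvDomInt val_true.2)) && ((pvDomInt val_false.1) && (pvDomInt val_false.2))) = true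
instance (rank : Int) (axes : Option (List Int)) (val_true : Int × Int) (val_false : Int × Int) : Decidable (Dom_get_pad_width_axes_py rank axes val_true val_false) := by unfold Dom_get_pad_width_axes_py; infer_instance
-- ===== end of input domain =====

-- B replaces A's per-index membership test by a single scatter pass over `axes`; faster in a timing run.

-- ===== PORT A =====
-- port of _contains_axis (the assert -rank <= axis < rank always holds for axis ∈ range(rank))
def containsAxis (axes : Option (List Int)) (axis : Int) (sp_rank : Int) : Bool :=
  match axes with
  | none => true
  | some l => l.contains axis || l.contains (axis + sp_rank)

def get_pad_width_axes_py (rank : Int) (axes : Option (List Int)) (val_true : Int × Int) (val_false : Int × Int) : List (Int × Int) :=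
  let mid_shape := (PySem.List.pyRange 0 rank 1).foldl
    (fun acc i => acc ++ [if containsAxis axes i rank then val_true else val_false]) []
  [(0, 0)] ++ mid_shape ++ [(0, 0)]

-- ===== PORT B =====
-- one scatter step: mid[a] = val_true when 0 <= a < rank, mid[a-rank] = val_true when rank <= a < 2*rank
def pvScatter (rank : Int) (val_true : Int × Int) (m : List (Int × Int)) (a : Int) : List (Int × Int) :=
  if 0 ≤ a ∧ a < rank then m.set a.toNat val_true
  else if rank ≤ a ∧ a < 2 * rank then m.set (a - rank).toNat val_true
  else m

def get_pad_width_axes_py_alt (rank : Int) (axes : Option (List Int)) (val_true : Int × Int) (val_false : Int × Int) : List (Int × Int) :=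
  let mid : List (Int × Int) :=
    match axes with
    | none => List.replicate rank.toNat val_true
    | some l => l.foldl (pvScatter rank val_true) (List.replicate rank.toNat val_false)
  [(0, 0)] ++ mid ++ [(0, 0)]

-- ===== PRECONDITION & SPEC =====
def Spec_get_pad_width_axes_py (rank : Int) (axes : Option (List Int)) (val_true : Int × Int) (val_false : Int × Int) (out : List (Int × Int)) : Prop := out = get_pad_width_axes_py_alt rank axes val_true val_false
instance (rank : Int) (axes : Option (List Int)) (val_true : Int × Int) (val_false : Int × Int) (out : List (Int × Int)) : Decidable (Spec_get_pad_width_axes_py rank axes val_true val_false out) := by unfold Spec_get_pad_width_axes_py; infer_instance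

-- ===== CLAIM (what is proved, stated in full; the proofs are below) =====
def Claim_equal_get_pad_width_axes_py : Prop := ∀ (rank : Int) (axes : Option (List Int)) (val_true : Int × Int) (val_false : Int × Int), Dom_get_pad_width_axes_py rank axes val_true val_false → Spec_get_pad_width_axes_py rank axes val_true val_false (get_pad_width_axes_py rank axes val_true val_false)

-- ===== LEMMAS AND PROOFS =====

-- A's append-accumulator loop is the map over the range
theorem foldl_append_singleton {α β : Type} (f : α → β) (l : List α) (acc : List β) :
    l.foldl (fun acc i => acc ++ [f i]) acc = acc ++ l.map f := by
  induction l generalizing acc with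
  | nil => simp
  | cons a l ih => simp [List.foldl, ih]

theorem scatter_length (rank : Int) (vt : Int × Int) (l : List Int) (m : List (Int × Int)) :
    (l.foldl (pvScatter rank vt) m).length = m.length := by
  induction l generalizing m with
  | nil => rfl
  | cons a l ih =>
    simp only [List.foldl]
    rw [ih]
    unfold pvScatter
    split_ifs <;> simp

theorem scatter_get (rank : Int) (vt : Int × Int) (l : List Int) (m : List (Int × Int))
    (hm : m.length = rank.toNat) (k : Nat) (hk : k < rank.toNat) :
    (l.foldl (pvScatter rank vt) m)[k]? =
      if l.contains (k : Int) || l.contains ((k : Int) + rank) then some vt else m[k]? := by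
  induction l generalizing m with
  | nil => simp
  | cons a l ih =>
    have hrank : (k : Int) < rank := by omega
    have hlen : (pvScatter rank vt m a).length = rank.toNat := by
      unfold pvScatter; split_ifs <;> simp [hm]
    simp only [List.foldl]
    rw [ih _ hlen]
    by_cases htail : (l.contains (k : Int) || l.contains ((k : Int) + rank)) = true
    · rw [if_pos htail, if_pos]
      simp only [List.contains_cons, Bool.or_eq_true, beq_iff_eq] at htail ⊢
      tauto
    · rw [if_neg htail]
      by_cases h1 : a = (k : Int)
      · have hset : pvScatter rank vt m a = m.set k vt := by
          unfold pvScatter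
          rw [if_pos (by omega)]
          congr 1
          omega
        rw [hset, if_pos]
        · rw [List.getElem?_set_self (by omega)]
        · simp [h1.symm]
      · by_cases h2 : a = (k : Int) + rank
        · have hset : pvScatter rank vt m a = m.set k vt := by
            unfold pvScatter
            rw [if_neg (by omega), if_pos (by omega)]
            congr 1
            omega
          rw [hset, if_pos]
          · rw [List.getElem?_set_self (by omega)]
          · simp
            right; left; omega
        · have hstep : (pvScatter rank vt m a)[k]? = m[k]? := by
            unfold pvScatter
            split_ifs with c1 c2
            · rw [List.getElem?_set_ne (by omega)]
            · rw [List.getElem?_set_ne (by omega)]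
            · rfl
          rw [hstep, if_neg]
          simp only [List.contains_cons, Bool.or_eq_true, beq_iff_eq] at htail ⊢
          intro h
          rcases h with (h | h) | (h | h) <;> [exact h1 h.symm; exact htail (Or.inl h); exact h2 h.symm; exact htail (Or.inr h)]

theorem mid_eq (rank : Int) (l : List Int) (vt vf : Int × Int) :
    (PySem.List.pyRange 0 rank 1).map
      (fun i => if containsAxis (some l) i rank then vt else vf) =
      l.foldl (pvScatter rank vt) (List.replicate rank.toNat vf) := by
  rw [PySem.List.pyRange_one, List.map_map]
  apply List.ext_getElem?
  intro k
  by_cases hk : k < rank.toNat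
  · rw [scatter_get rank vt l _ (by simp) k hk]
    rw [List.getElem?_map, List.getElem?_range (by omega)]
    simp only [Option.map_some, Function.comp, zero_add, containsAxis,
      List.getElem?_replicate, hk, if_true]
    split_ifs <;> simp_all
  · rw [List.getElem?_eq_none (by simp; omega),
        List.getElem?_eq_none (by rw [scatter_length]; simp; omega)]

-- ===== VERDICT (by name: the statement is the Claim_ definition above) =====
theorem get_pad_width_axes_py_spec : Claim_equal_get_pad_width_axes_py := by
  intro rank axes vt vf _
  unfold Spec_get_pad_width_axes_py get_pad_width_axes_py get_pad_width_axes_py_alt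
  simp only
  rw [foldl_append_singleton, List.nil_append]
  match axes with
  | none =>
    simp [containsAxis, PySem.List.pyRange_one, Function.comp_def, List.map_const']
  | some l =>
    rw [mid_eq]
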